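-- pv_equiv track=rewrite | github.com/sabihanjum/GFG_160 | Matrix/make_matrix_beautiful.py | findMinOperation
-- ===== SOURCE A (Python) =====
-- def findMinOperation(mat):
--     # code here
--     n = len(mat)
--     res = 0
--     maxSum = 0
--
--     #find maximum sum across all the row
--     for i in range(n):
--         sum = 0
--         for j in range(n):
--             sum += mat[i][j]
--         maxSum = max(sum, maxSum)
--
--     #find maximum sum across all the column
--     for j in range(n):
--         sum = 0
--         for i in range(n):
--             sum += mat[i][j]
--         maxSum = max(sum, maxSum)
--
--     #sum of operation across alll the rows
--     for i in range(n):
--         sum = 0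
--         for j in range(n):
--             sum += mat[i][j]
--         res += (maxSum - sum)
--
--     return res
-- ===== SOURCE B (Python) =====
-- def findMinOperation(mat):
--     n = len(mat)
--
--     def go(rows, col, best, total):
--         if not rows:
--             return n * max([best] + col) - total
--         row = rows[0]
--         r = sum(row[j] for j in range(n))
--         return go(rows[1:], [col[j] + row[j] for j in range(n)],
--                   max(best, r), total + r)
--
--     return go(mat, [0] * n, 0, 0)
-- ===== Notes on version B (the rewrite author's own statement) =====
-- stated objective: alternative
-- what changed: B is a single recursive pass over the rows carrying a column-sum accumulator vector, a running row-sum maximum and a running total (each cell read once), finishing with max([best]+col) and the closed form n*best - total; A makes three separate index-based nested passes, re-summing every row three times and never storing per-column sums.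
import Mathlib
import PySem

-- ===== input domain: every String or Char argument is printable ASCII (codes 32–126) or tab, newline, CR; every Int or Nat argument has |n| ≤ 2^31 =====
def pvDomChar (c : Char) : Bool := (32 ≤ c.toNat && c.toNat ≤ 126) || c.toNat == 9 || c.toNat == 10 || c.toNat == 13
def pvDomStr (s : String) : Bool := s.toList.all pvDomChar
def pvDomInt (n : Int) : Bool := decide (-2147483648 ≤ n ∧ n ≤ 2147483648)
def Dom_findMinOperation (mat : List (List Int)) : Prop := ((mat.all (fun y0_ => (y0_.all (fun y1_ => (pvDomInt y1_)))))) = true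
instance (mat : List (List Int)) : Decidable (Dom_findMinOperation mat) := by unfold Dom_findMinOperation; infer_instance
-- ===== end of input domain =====

-- B replaces A's three staged nested index passes by one recursive pass over the rows
-- carrying a column-sum accumulator, a running max and a running total (alternative decomposition).


-- ===== PORT A =====
-- literal port of A; mat[i][j] is pyGetD, exact whenever the index is in range (guaranteed by Pre_)
def findMinOperation (mat : List (List Int)) : Int :=
  let n : Int := mat.length
  let maxSum1 : Int := (PySem.List.pyRange 0 n 1).foldl (fun m i =>
      max ((PySem.List.pyRange 0 n 1).foldl
        (fun s j => s + PySem.List.pyGetD (PySem.List.pyGetD mat i []) j 0) 0) m) 0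
  let maxSum : Int := (PySem.List.pyRange 0 n 1).foldl (fun m j =>
      max ((PySem.List.pyRange 0 n 1).foldl
        (fun s i => s + PySem.List.pyGetD (PySem.List.pyGetD mat i []) j 0) 0) m) maxSum1
  (PySem.List.pyRange 0 n 1).foldl (fun r i =>
      r + (maxSum - (PySem.List.pyRange 0 n 1).foldl
        (fun s j => s + PySem.List.pyGetD (PySem.List.pyGetD mat i []) j 0) 0)) 0

-- ===== PORT B =====
-- port of Source B's recursive helper 'go': one pass over the rows, state = (col, best, total)
def goB (n : Int) : List (List Int) → List Int → Int → Int → Int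
  | [], col, best, total =>
      n * (PySem.List.max? (best :: col) (fun y => y)).getD 0 - total
  | row :: rows, col, best, total =>
      let r : Int := ((PySem.List.pyRange 0 n 1).map (fun j => PySem.List.pyGetD row j 0)).sum
      goB n rows
        ((PySem.List.pyRange 0 n 1).map
          (fun j => PySem.List.pyGetD col j 0 + PySem.List.pyGetD row j 0))
        (max best r) (total + r)

def findMinOperation_alt (mat : List (List Int)) : Int :=
  goB mat.length mat (List.replicate mat.length 0) 0 0

-- ===== PRECONDITION & SPEC =====
-- Pre_: every row has at least len(mat) entries; on shorter rows Python A raises IndexError at mat[i][j].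
def Pre_findMinOperation (mat : List (List Int)) : Prop :=
  ∀ row ∈ mat, mat.length ≤ row.length
instance (mat : List (List Int)) : Decidable (Pre_findMinOperation mat) := by
  unfold Pre_findMinOperation; infer_instance
def pvWitness_findMinOperation : List (List Int) := [[1, 2], [3, 4]]

def Spec_findMinOperation (mat : List (List Int)) (out : Int) : Prop := out = findMinOperation_alt mat
instance (mat : List (List Int)) (out : Int) : Decidable (Spec_findMinOperation mat out) := by unfold Spec_findMinOperation; infer_instance

-- ===== CLAIM (what is proved, stated in full; the proofs are below) =====
def Claim_equal_findMinOperation : Prop := ∀ (mat : List (List Int)), Dom_findMinOperation mat → Pre_findMinOperation mat → Spec_findMinOperation mat (findMinOperation mat)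

-- ===== LEMMAS AND PROOFS =====

theorem foldl_max_swap (f : Int → Int) (l : List Int) (a : Int) :
    l.foldl (fun m i => max (f i) m) a = (l.map f).foldl max a := by
  induction l generalizing a with
  | nil => rfl
  | cons x t ih =>
    simp only [List.foldl_cons, List.map_cons]
    rw [ih, max_comm]

theorem sum_map_sub (l : List Int) (f : Int → Int) (M : Int) :
    (l.map (fun i => M - f i)).sum = l.length * M - (l.map f).sum := by
  induction l with
  | nil => simp
  | cons x t ih => simp [ih]; ring

-- characterisation of B's recursive pass
theorem goB_spec (n : Int) (rows : List (List Int)) :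
    ∀ (col : List Int) (best total : Int),
    goB n rows col best total =
      n * ((rows.foldl (fun c row => (PySem.List.pyRange 0 n 1).map
              (fun j => PySem.List.pyGetD c j 0 + PySem.List.pyGetD row j 0)) col).foldl max
            (rows.foldl (fun b row =>
              max b (((PySem.List.pyRange 0 n 1).map (fun j => PySem.List.pyGetD row j 0)).sum)) best))
        - (total + (rows.map (fun row =>
              ((PySem.List.pyRange 0 n 1).map (fun j => PySem.List.pyGetD row j 0)).sum)).sum) := by
  induction rows with
  | nil =>
    intro col best total
    simp [goB, PySem.List.max?_id_cons]
  | cons row rows ih =>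
    intro col best total
    simp only [goB, ih, List.foldl_cons, List.map_cons, List.sum_cons]
    ring_nf

-- the column accumulator of B, when it starts as a map over range(n), stays one
theorem foldl_col (n : Int) (rows : List (List Int)) :
    ∀ (g : Int → Int),
    rows.foldl (fun c row => (PySem.List.pyRange 0 n 1).map
        (fun j => PySem.List.pyGetD c j 0 + PySem.List.pyGetD row j 0))
      ((PySem.List.pyRange 0 n 1).map g) =
    (PySem.List.pyRange 0 n 1).map
      (fun j => g j + (rows.map (fun row => PySem.List.pyGetD row j 0)).sum) := by
  induction rows with
  | nil => intro g; simp
  | cons row rows ih =>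
    intro g
    simp only [List.foldl_cons, List.map_cons, List.sum_cons]
    have hstep : (PySem.List.pyRange 0 n 1).map
        (fun j => PySem.List.pyGetD ((PySem.List.pyRange 0 n 1).map g) j 0 + PySem.List.pyGetD row j 0)
        = (PySem.List.pyRange 0 n 1).map (fun j => g j + PySem.List.pyGetD row j 0) := by
      apply List.map_congr_left
      intro j hj
      rw [PySem.List.mem_pyRange_one] at hj
      rw [PySem.List.pyGetD_map_pyRange_of_nonneg g n j 0 hj.1 hj.2]
    rw [hstep, ih]
    apply List.map_congr_left
    intro j _
    ring

-- bridge: an index loop over range(len(mat)) reading mat[i] is a structural map over mat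
theorem map_pyRange_rows (mat : List (List Int)) (f : List Int → Int) :
    (PySem.List.pyRange 0 (mat.length : Int) 1).map
        (fun i => f (PySem.List.pyGetD mat i [])) = mat.map f := by
  have h := PySem.List.map_pyGetD_pyRange_zero' mat ([] : List Int)
  calc (PySem.List.pyRange 0 (mat.length : Int) 1).map (fun i => f (PySem.List.pyGetD mat i []))
      = ((PySem.List.pyRange 0 (mat.length : Int) 1).map (fun i => PySem.List.pyGetD mat i [])).map f := by
        rw [List.map_map]; rfl
    _ = mat.map f := by rw [h]

theorem findMinOperation_spec : Claim_equal_findMinOperation := by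
  intro mat _ _
  show findMinOperation mat = findMinOperation_alt mat
  unfold findMinOperation findMinOperation_alt
  dsimp only
  -- abbreviations
  set n : Int := (mat.length : Int) with hn
  -- B side
  have hrepl : List.replicate mat.length (0 : Int) = (PySem.List.pyRange 0 n 1).map (fun _ => (0 : Int)) := by
    rw [List.map_const', PySem.List.length_pyRange_one]
    simp [hn]
  rw [hrepl, goB_spec, foldl_col, List.foldl_map]
  simp only [zero_add]
  -- A side: turn every inner foldl into a sum over a map, and the outer max-folds into foldl max
  simp only [PySem.List.foldl_add, zero_add, foldl_max_swap]
  -- the third pass is the closed form n*maxSum - total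
  rw [sum_map_sub]
  -- row sums: index form = structural form (both in maxSum and in the total)
  rw [map_pyRange_rows mat
    (fun row => ((PySem.List.pyRange 0 n 1).map (fun j => PySem.List.pyGetD row j 0)).sum)]
  -- column sums: inner index loop over i equals structural sum over rows
  have hcol : (PySem.List.pyRange 0 n 1).map (fun j =>
        ((PySem.List.pyRange 0 n 1).map (fun i => PySem.List.pyGetD (PySem.List.pyGetD mat i []) j 0)).sum)
      = (PySem.List.pyRange 0 n 1).map (fun j =>
        (mat.map (fun row => PySem.List.pyGetD row j 0)).sum) := by
    apply List.map_congr_left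
    intro j _
    rw [map_pyRange_rows mat (fun row => PySem.List.pyGetD row j 0)]
  rw [hcol]
  rw [PySem.List.length_pyRange_one, List.foldl_map]
  have h : ((((n : Int) - 0).toNat : Nat) : Int) = n := by simp [hn]
  rw [h, List.foldl_map]

-- ===== VERDICT (by name: the statement is the Claim_ definition above) =====
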